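-- pv_equiv track=rewrite | github.com/edoomm/Analisis-de-algoritmos | P5/mochila.py | seleccionarMenor
-- ===== SOURCE A (Python) =====
-- def seleccionarMenor(L):
--     idx = 0
--     min = L[idx]
--     for i in range(len(L)):
--         if (L[i] != -1 and L[i] < min) or (min == -1 and L[i] != -1):
--             min = L[i]
--             idx = i
--
--     L[idx] = -1
--     return idx
-- ===== SOURCE B (Python) =====
-- def seleccionarMenor(L):
--     pairs = sorted((v, i) for i, v in enumerate(L) if v != -1)
--     idx = pairs[0][1] if pairs else 0
--     L[idx] = -1
--     return idx
-- ===== Notes on version B (the rewrite author's own statement) =====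
-- stated objective: alternative
-- what changed: Replaces A's single-pass running-minimum loop with its compound -1/min==-1 guard by sort-based selection: build (value,index) pairs for non-(-1) entries, sort them, and take the head's index (lexicographic tuple order gives the first minimal index); trades the single scan for a sort, which is not faster.
import Mathlib
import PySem

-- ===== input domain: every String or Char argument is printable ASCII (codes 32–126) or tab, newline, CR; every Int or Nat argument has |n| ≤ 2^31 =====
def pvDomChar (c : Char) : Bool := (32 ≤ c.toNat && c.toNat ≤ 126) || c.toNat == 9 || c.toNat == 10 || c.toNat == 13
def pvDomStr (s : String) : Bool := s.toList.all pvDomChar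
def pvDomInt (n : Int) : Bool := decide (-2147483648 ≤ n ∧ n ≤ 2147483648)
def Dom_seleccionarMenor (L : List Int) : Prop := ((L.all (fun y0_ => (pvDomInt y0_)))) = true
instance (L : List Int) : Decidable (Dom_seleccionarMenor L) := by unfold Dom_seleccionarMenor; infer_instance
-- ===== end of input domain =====

-- B replaces A's running-minimum loop by sort-based selection: sort (value, index) pairs of the
-- non-(-1) entries and take the head's index (an alternative algorithm of different shape, not faster).
-- Both Pythons mutate L (L[idx] = -1) identically; the equivalence proved here is about the RETURN value.

-- ===== PORT A =====
def seleccionarMenor (L : List Int) : Int :=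
  let idx : Int := 0
  let mn : Int := PySem.List.pyGetD L idx 0   -- L[0]; raises IndexError on empty L, excluded by Pre_
  let s := (PySem.List.pyRange 0 (L.length : Int) 1).foldl
    (fun (st : Int × Int) i =>
      let li := PySem.List.pyGetD L i 0
      if (li ≠ -1 ∧ li < st.1) ∨ (st.1 = -1 ∧ li ≠ -1) then (li, i) else st)
    (mn, idx)
  s.2

-- ===== PORT B =====
def seleccionarMenor_alt (L : List Int) : Int :=
  let pairs := PySem.List.sorted2
      (((PySem.List.enumerate L 0).filter (fun p => p.2 != -1)).map (fun p => (p.2, p.1)))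
      (fun q => q.1) (fun q => q.2)
  match pairs with
  | q :: _ => q.2
  | [] => 0

-- ===== PRECONDITION & SPEC =====
-- Pre_ excludes only the empty list, where both A and B raise IndexError (A at 'L[0]', B at 'L[0] = -1').
def Pre_seleccionarMenor (L : List Int) : Prop := L ≠ []
instance (L : List Int) : Decidable (Pre_seleccionarMenor L) := by unfold Pre_seleccionarMenor; infer_instance
def pvWitness_seleccionarMenor : List Int := ([3, -1, 2])

def Spec_seleccionarMenor (L : List Int) (out : Int) : Prop := out = seleccionarMenor_alt L
instance (L : List Int) (out : Int) : Decidable (Spec_seleccionarMenor L out) := by unfold Spec_seleccionarMenor; infer_instance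

-- ===== CLAIM (what is proved, stated in full; the proofs are below) =====
def Claim_equal_seleccionarMenor : Prop := ∀ (L : List Int), Dom_seleccionarMenor L → Pre_seleccionarMenor L → Spec_seleccionarMenor L (seleccionarMenor L)

-- ===== LEMMAS AND PROOFS =====

-- Common characterisation both ports are reduced to: the first index of minimal value among
-- the non-(-1) positions, or 0 if there is none.
def pvMinIdx (L : List Int) : Int :=
  match PySem.List.min?
      ((PySem.List.pyRange 0 (L.length : Int) 1).filter (fun i => PySem.List.pyGetD L i 0 != -1))
      (fun i => PySem.List.pyGetD L i 0) with
  | some m => m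
  | none => 0

-- A's loop step and the min?-fold step, named for the lemmas below.
def pvStepA (L : List Int) (st : Int × Int) (i : Int) : Int × Int :=
  let li := PySem.List.pyGetD L i 0
  if (li ≠ -1 ∧ li < st.1) ∨ (st.1 = -1 ∧ li ≠ -1) then (li, i) else st

def pvStepM (L : List Int) (acc : Option Int) (x : Int) : Option Int :=
  match acc with
  | none => some x
  | some m => if PySem.List.pyGetD L x 0 < PySem.List.pyGetD L m 0 then some x else some m

-- the lexicographic 'before' comparison sorted2 uses for B's (value, index) pairs
def pvB (a b : Int × Int) : Bool :=
  decide (a.1 < b.1) || (!decide (b.1 < a.1) && decide (a.2 < b.2))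

-- head-tracking step of an insertion-sort fold
def pvHd {α : Type} (before : α → α → Bool) (o : Option α) (x : α) : Option α :=
  match o with
  | none => some x
  | some y => some (if before x y then x else y)

-- a min?-fold started from 'some' never returns none
lemma pv_foldl_some (L : List Int) (l : List Int) :
    ∀ a : Int, ∃ r, l.foldl (pvStepM L) (some a) = some r := by
  induction l with
  | nil => intro a; exact ⟨a, rfl⟩
  | cons i t ih =>
    intro a
    by_cases h : PySem.List.pyGetD L i 0 < PySem.List.pyGetD L a 0
    · have hs : pvStepM L (some a) i = some i := by simp [pvStepM, h]
      rw [List.foldl_cons, hs]; exact ih i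
    · have hs : pvStepM L (some a) i = some a := by simp [pvStepM, h]
      rw [List.foldl_cons, hs]; exact ih a

-- Invariant link between A's (min, idx) state and the min?-fold accumulator over the
-- candidate (non-(-1)) indices.
lemma pv_loop_eq (L : List Int) (is : List Int) :
    ∀ (acc : Option Int) (mn idx : Int),
    (acc = none → mn = -1) →
    (∀ m, acc = some m → mn = PySem.List.pyGetD L m 0 ∧ mn ≠ -1 ∧ idx = m) →
    is.foldl (pvStepA L) (mn, idx)
      = match (is.filter (fun i => PySem.List.pyGetD L i 0 != -1)).foldl (pvStepM L) acc with
        | none => (mn, idx)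
        | some m => (PySem.List.pyGetD L m 0, m) := by
  induction is with
  | nil =>
    intro acc mn idx h0 h1
    cases acc with
    | none => simp [h0 rfl]
    | some m => obtain ⟨e1, _, e3⟩ := h1 m rfl; simp [e1, e3]
  | cons i t ih =>
    intro acc mn idx h0 h1
    by_cases hi : PySem.List.pyGetD L i 0 = -1
    · -- i is not a candidate: A keeps its state, the filter drops i
      have hA : pvStepA L (mn, idx) i = (mn, idx) := by
        simp [pvStepA, hi]
      simp only [List.foldl_cons, List.filter_cons, hi, hA]
      simp only [bne_self_eq_false, Bool.false_eq_true, if_false]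
      exact ih acc mn idx h0 h1
    · -- i is a candidate
      have hfil : ((i :: t).filter (fun j => PySem.List.pyGetD L j 0 != -1))
          = i :: t.filter (fun j => PySem.List.pyGetD L j 0 != -1) := by
        simp [hi]
      cases acc with
      | none =>
        have hmn : mn = -1 := h0 rfl
        have hA : pvStepA L (mn, idx) i = (PySem.List.pyGetD L i 0, i) := by
          simp [pvStepA, hi, hmn]
        have hM : pvStepM L none i = some i := rfl
        obtain ⟨r, hr⟩ := pv_foldl_some L (t.filter (fun j => PySem.List.pyGetD L j 0 != -1)) i
        have hih := ih (some i) (PySem.List.pyGetD L i 0) i (by simp)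
          (by intro m hm; cases hm; exact ⟨rfl, hi, rfl⟩)
        rw [hr] at hih
        rw [List.foldl_cons, hfil, hA, List.foldl_cons, hM, hr]
        exact hih
      | some m =>
        obtain ⟨e1, e2, e3⟩ := h1 m rfl
        have e2' : PySem.List.pyGetD L m 0 ≠ -1 := e1 ▸ e2
        by_cases hlt : PySem.List.pyGetD L i 0 < PySem.List.pyGetD L m 0
        · have hA : pvStepA L (mn, idx) i = (PySem.List.pyGetD L i 0, i) := by
            simp [pvStepA, hi, e1, hlt]
          have hM : pvStepM L (some m) i = some i := by simp [pvStepM, hlt]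
          obtain ⟨r, hr⟩ := pv_foldl_some L (t.filter (fun j => PySem.List.pyGetD L j 0 != -1)) i
          have hih := ih (some i) (PySem.List.pyGetD L i 0) i (by simp)
            (by intro m' hm'; cases hm'; exact ⟨rfl, hi, rfl⟩)
          rw [hr] at hih
          rw [List.foldl_cons, hfil, hA, List.foldl_cons, hM, hr]
          exact hih
        · have hA : pvStepA L (mn, idx) i = (mn, idx) := by
            simp [pvStepA, hi, e1, hlt, e2']
          have hM : pvStepM L (some m) i = some m := by simp [pvStepM, hlt]
          rw [List.foldl_cons, hfil, hA, List.foldl_cons, hM]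
          exact ih (some m) mn idx (by simp)
            (by intro m' hm'; cases hm'; exact ⟨e1, e2, e3⟩)

-- A equals the common characterisation on nonempty lists.
lemma pvA_eq (L : List Int) (h : L ≠ []) : seleccionarMenor L = pvMinIdx L := by
  obtain ⟨x, t, rfl⟩ := List.exists_cons_of_ne_nil h
  have hlen : (0 : Int) < ((x :: t).length : Int) := by
    simp only [List.length_cons]; push_cast; omega
  have hrange : PySem.List.pyRange 0 ((x :: t).length : Int) 1
      = 0 :: PySem.List.pyRange 1 ((x :: t).length : Int) 1 :=
    PySem.List.pyRange_one_cons hlen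
  have hg0 : PySem.List.pyGetD (x :: t) (0 : Int) 0 = x :=
    PySem.List.pyGetD_zero_cons x t 0
  set T := PySem.List.pyRange 1 ((x :: t).length : Int) 1 with hT
  set F := T.filter (fun i => PySem.List.pyGetD (x :: t) i 0 != -1) with hF
  -- A's side via the invariant lemma
  have hA : seleccionarMenor (x :: t)
      = (match F.foldl (pvStepM (x :: t)) (if x = -1 then none else some 0) with
         | none => ((x : Int), (0 : Int))
         | some m => (PySem.List.pyGetD (x :: t) m 0, m)).2 := by
    show (((PySem.List.pyRange 0 ((x :: t).length : Int) 1)).foldl (pvStepA (x :: t))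
        (PySem.List.pyGetD (x :: t) (0 : Int) 0, 0)).2 = _
    rw [hrange, hg0]
    by_cases hx : x = -1
    · have h0 : pvStepA (x :: t) (x, 0) 0 = (x, 0) := by
        simp [pvStepA, hx]
      rw [List.foldl_cons, h0,
        pv_loop_eq (x :: t) T none x 0 (fun _ => hx) (by intro m hm; cases hm),
        if_pos hx]
    · have h0 : pvStepA (x :: t) (x, 0) 0 = (x, 0) := by
        simp [pvStepA, hx]
      rw [List.foldl_cons, h0,
        pv_loop_eq (x :: t) T (some 0) x 0 (by intro hc; cases hc)
          (by intro m hm; cases hm; exact ⟨hg0.symm, hx, rfl⟩),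
        if_neg hx]
  -- the characterisation: min? IS the pvStepM fold from none (definitionally)
  have hB : pvMinIdx (x :: t)
      = (match ((0 :: T).filter (fun i => PySem.List.pyGetD (x :: t) i 0 != -1)).foldl
            (pvStepM (x :: t)) none with
         | some m => m
         | none => (0 : Int)) := by
    show (match PySem.List.min? ((PySem.List.pyRange 0 ((x :: t).length : Int) 1).filter
            (fun i => PySem.List.pyGetD (x :: t) i 0 != -1))
            (fun i => PySem.List.pyGetD (x :: t) i 0) with
          | some m => m
          | none => (0 : Int)) = _
    rw [hrange, PySem.List.min?]
    congr 1
    congr 1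
    funext a y
    cases a <;> rfl
  rw [hA, hB]
  by_cases hx : x = -1
  · have hfc : ((0 :: T).filter (fun i => PySem.List.pyGetD (x :: t) i 0 != -1)) = F := by
      simp [hx, hF]
    rw [hfc, if_pos hx]
    cases F.foldl (pvStepM (x :: t)) none <;> rfl
  · have hfc : ((0 :: T).filter (fun i => PySem.List.pyGetD (x :: t) i 0 != -1)) = 0 :: F := by
      simp [hx, hF]
    have h00 : pvStepM (x :: t) none 0 = some 0 := rfl
    rw [hfc, if_neg hx, List.foldl_cons, h00]
    obtain ⟨r, hr⟩ := pv_foldl_some (x :: t) F 0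
    rw [hr]

-- head of an insertBy insertion depends only on the old head
lemma pv_head_insertBy {α : Type} (before : α → α → Bool) (x : α) (ys : List α) :
    (PySem.List.insertBy before x ys).head?
      = some (match ys with | [] => x | y :: _ => if before x y then x else y) := by
  cases ys with
  | nil => rfl
  | cons y ys => by_cases h : before x y <;> simp [PySem.List.insertBy, h]

-- head of an insertion-sort fold = a running "keep the smaller, incumbent wins ties" fold
lemma pv_head_foldl_insertBy {α : Type} (before : α → α → Bool) (l : List α) :
    ∀ init : List α,
    (l.foldl (fun acc x => PySem.List.insertBy before x acc) init).head?
      = l.foldl (pvHd before) init.head? := by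
  induction l with
  | nil => intro init; rfl
  | cons x t ih =>
    intro init
    rw [List.foldl_cons, List.foldl_cons, ih]
    congr 1
    rw [pv_head_insertBy]
    cases init <;> rfl

-- the lexicographic running-min fold over (value, index) pairs with strictly increasing
-- indices is the min?-fold over the indices (the index tiebreak never fires)
lemma pv_gfold (L : List Int) (l : List Int) :
    ∀ (o : Option Int),
    (∀ m, o = some m → ∀ j ∈ l, m < j) → l.Pairwise (· < ·) →
    l.foldl (fun a j => pvHd pvB a (PySem.List.pyGetD L j 0, j))
      (o.map (fun m => (PySem.List.pyGetD L m 0, m)))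
      = (l.foldl (pvStepM L) o).map (fun m => (PySem.List.pyGetD L m 0, m)) := by
  induction l with
  | nil => intro o _ _; rfl
  | cons j t ih =>
    intro o hbd hpw
    have hpw' : t.Pairwise (· < ·) := hpw.of_cons
    have hjt : ∀ x ∈ t, j < x := fun x hx => List.rel_of_pairwise_cons hpw hx
    cases o with
    | none =>
      rw [List.foldl_cons, List.foldl_cons]
      show t.foldl _ ((some j).map (fun m => (PySem.List.pyGetD L m 0, m)))
          = (t.foldl (pvStepM L) (pvStepM L none j)).map _
      rw [show pvStepM L none j = some j from rfl]
      exact ih (some j) (by rintro m ⟨rfl⟩; exact hjt) hpw'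
    | some m =>
      have hmj : m < j := hbd m rfl j List.mem_cons_self
      rw [List.foldl_cons, List.foldl_cons]
      by_cases hlt : PySem.List.pyGetD L j 0 < PySem.List.pyGetD L m 0
      · have hs : pvHd pvB ((some m).map (fun m => (PySem.List.pyGetD L m 0, m)))
            (PySem.List.pyGetD L j 0, j) = (some j).map (fun m => (PySem.List.pyGetD L m 0, m)) := by
          simp [pvHd, pvB, hlt]
        rw [hs, show pvStepM L (some m) j = some j by simp [pvStepM, hlt]]
        exact ih (some j) (by rintro m' ⟨rfl⟩; exact hjt) hpw'
      · have hs : pvHd pvB ((some m).map (fun m => (PySem.List.pyGetD L m 0, m)))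
            (PySem.List.pyGetD L j 0, j) = (some m).map (fun m => (PySem.List.pyGetD L m 0, m)) := by
          simp [pvHd, pvB, hlt, not_lt.mpr (le_of_lt hmj)]
        rw [hs, show pvStepM L (some m) j = some m by simp [pvStepM, hlt]]
        exact ih (some m) (by intro m' hm' x hx; cases hm'; exact hbd m rfl x (List.mem_cons_of_mem _ hx)) hpw'

-- B equals the common characterisation (on every list).
lemma pvB_eq (L : List Int) : seleccionarMenor_alt L = pvMinIdx L := by
  set cand := (PySem.List.pyRange 0 (L.length : Int) 1).filter
      (fun i => PySem.List.pyGetD L i 0 != -1) with hcand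
  -- the sorted2 input is the candidate indices mapped to (value, index) pairs
  have hP : ((PySem.List.enumerate L 0).filter (fun p => p.2 != -1)).map (fun p => (p.2, p.1))
      = cand.map (fun j => (PySem.List.pyGetD L j 0, j)) := by
    rw [PySem.List.enumerate_eq_map_pyRange L 0, List.filter_map, List.map_map, hcand]
    rfl
  have hpwc : cand.Pairwise (· < ·) :=
    List.Pairwise.filter _ (PySem.List.pairwise_lt_pyRange_one 0 (L.length : Int))
  -- head of the sorted pairs = min?-fold over the candidates, via the insertBy fold
  have hhead : (PySem.List.sorted2
        (((PySem.List.enumerate L 0).filter (fun p => p.2 != -1)).map (fun p => (p.2, p.1)))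
        (fun q : Int × Int => q.1) (fun q => q.2)).head?
      = (PySem.List.min? cand (fun i => PySem.List.pyGetD L i 0)).map
          (fun m => (PySem.List.pyGetD L m 0, m)) := by
    rw [show PySem.List.min? cand (fun i => PySem.List.pyGetD L i 0) = cand.foldl (pvStepM L) none by
      rw [PySem.List.min?]; congr 1; funext a y; cases a <;> rfl]
    rw [show (PySem.List.sorted2
        (((PySem.List.enumerate L 0).filter (fun p => p.2 != -1)).map (fun p => (p.2, p.1)))
        (fun q : Int × Int => q.1) (fun q => q.2))
      = (((PySem.List.enumerate L 0).filter (fun p => p.2 != -1)).map (fun p => (p.2, p.1))).foldl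
          (fun acc x => PySem.List.insertBy pvB x acc) []
      from rfl]
    rw [pv_head_foldl_insertBy, hP, List.foldl_map,
      show ([] : List (Int × Int)).head?
          = Option.map (fun m => (PySem.List.pyGetD L m 0, m)) none from rfl]
    exact pv_gfold L cand none (by intro m hm; cases hm) hpwc
  show (match PySem.List.sorted2
        (((PySem.List.enumerate L 0).filter (fun p => p.2 != -1)).map (fun p => (p.2, p.1)))
        (fun q : Int × Int => q.1) (fun q => q.2) with
      | q :: _ => q.2
      | [] => (0 : Int)) = pvMinIdx L
  rw [pvMinIdx, ← hcand]
  cases hs : PySem.List.sorted2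
      (((PySem.List.enumerate L 0).filter (fun p => p.2 != -1)).map (fun p => (p.2, p.1)))
      (fun q : Int × Int => q.1) (fun q => q.2) with
  | nil =>
    rw [hs] at hhead
    cases hm : PySem.List.min? cand (fun i => PySem.List.pyGetD L i 0) with
    | none => rfl
    | some m => rw [hm] at hhead; simp at hhead
  | cons q r =>
    rw [hs] at hhead
    cases hm : PySem.List.min? cand (fun i => PySem.List.pyGetD L i 0) with
    | none => rw [hm] at hhead; simp at hhead
    | some m =>
      rw [hm] at hhead
      simp only [Option.map_some, List.head?_cons, Option.some.injEq] at hhead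
      simp [hhead]

-- ===== VERDICT (by name: the statement is the Claim_ definition above) =====
theorem seleccionarMenor_spec : Claim_equal_seleccionarMenor := by
  intro L _ hpre
  show seleccionarMenor L = seleccionarMenor_alt L
  rw [pvA_eq L hpre, pvB_eq L]
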